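-- pv_equiv track=rewrite | github.com/Owrel/Project-KRR | mergers/iterativeLayers/benchmarking.py | count_atoms
-- ===== SOURCE A (Python) =====
-- def count_atoms(atoms):
--     bracketdepth = 0
--     count = 0
--     for c in atoms:
--         if(c == "("):
--             bracketdepth +=1
--         if(c==")"):
--             bracketdepth-=1
--             if(bracketdepth == 0):
--                 count +=1
--     return count
-- ===== SOURCE B (Python) =====
-- def count_atoms(atoms):
--     # Stateless brute force: a ')' finishes a top-level atom exactly when its
--     # inclusive prefix contains equally many '(' and ')'.  No running depth,
--     # no mutable state: each candidate position re-scans its prefix.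
--     return sum(
--         1
--         for i, c in enumerate(atoms)
--         if c == ")" and atoms[: i + 1].count("(") == atoms[: i + 1].count(")")
--     )
-- ===== Notes on version B (the rewrite author's own statement) =====
-- stated objective: alternative
-- what changed: Replaces A's single stateful pass (mutable running depth and counter) by a stateless brute-force rule: for each ')' position, re-scan and compare the '(' and ')' counts of its inclusive prefix; correct because the running depth at a ')' equals the prefix '(' count minus the prefix ')' count.
import Mathlib
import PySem

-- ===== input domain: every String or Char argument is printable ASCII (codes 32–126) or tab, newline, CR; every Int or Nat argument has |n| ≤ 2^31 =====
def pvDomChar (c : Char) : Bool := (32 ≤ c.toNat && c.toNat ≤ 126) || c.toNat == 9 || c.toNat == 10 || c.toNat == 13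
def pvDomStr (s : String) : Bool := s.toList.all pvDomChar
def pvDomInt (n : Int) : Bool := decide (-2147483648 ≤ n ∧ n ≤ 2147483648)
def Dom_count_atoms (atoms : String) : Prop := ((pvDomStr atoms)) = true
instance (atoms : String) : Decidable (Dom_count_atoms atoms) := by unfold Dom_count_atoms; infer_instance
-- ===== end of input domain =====

-- B replaces A's single stateful depth-tracking pass by a stateless brute force:
-- for each ')' position, re-scan the inclusive prefix and compare its '(' and ')' counts.
-- Objective: alternative (O(n) -> O(n^2), no mutable state).

-- ===== PORT A =====
-- A's loop: state (bracketdepth, count), character by character.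
def count_atoms (atoms : String) : Int :=
  (atoms.toList.foldl
    (fun (s : Int × Int) c =>
      let bd := if c = '(' then s.1 + 1 else s.1
      if c = ')' then
        let bd' := bd - 1
        (bd', if bd' = 0 then s.2 + 1 else s.2)
      else (bd, s.2))
    (0, 0)).2

-- ===== PORT B =====
-- Source B: sum(1 for i, c in enumerate(atoms) if c == ")" and
--             atoms[:i+1].count("(") == atoms[:i+1].count(")"))
-- (enumerate → PySem.List.enumerate, atoms[:i+1] → PySem.List.slice on the code points,
--  str.count → PySem.Chars.count — each string step exact via the Chars bridge)
def count_atoms_alt (atoms : String) : Int :=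
  let cs := atoms.toList
  ((PySem.List.enumerate cs 0).map (fun p =>
    if p.2 = ')' ∧
       PySem.Chars.count (PySem.List.slice cs none (some (p.1 + 1))) ['('] =
       PySem.Chars.count (PySem.List.slice cs none (some (p.1 + 1))) [')']
    then (1 : Int) else 0)).sum

-- ===== PRECONDITION & SPEC =====
def Spec_count_atoms (atoms : String) (out : Int) : Prop := out = count_atoms_alt atoms
instance (atoms : String) (out : Int) : Decidable (Spec_count_atoms atoms out) := by unfold Spec_count_atoms; infer_instance

-- ===== CLAIM (what is proved, stated in full; the proofs are below) =====
def Claim_equal_count_atoms : Prop := ∀ (atoms : String), Dom_count_atoms atoms → Spec_count_atoms atoms (count_atoms atoms)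

-- ===== LEMMAS AND PROOFS =====

-- Python's str.count for a single-character pattern is the character count (go = fuel loop of PySem.Chars.count).
lemma go_singleton (c : Char) : ∀ (l : List Char) (fuel acc : Nat), l.length ≤ fuel →
    PySem.Chars.count.go [c] fuel l acc = acc + l.count c := by
  intro l
  induction l with
  | nil => intro fuel acc _; cases fuel <;> simp [PySem.Chars.count.go]
  | cons h t ih =>
    intro fuel acc hle
    cases fuel with
    | zero => simp at hle
    | succ f =>
      by_cases hc : c = h
      · subst hc
        simp [PySem.Chars.count.go, List.isPrefixOf, ih f (acc+1) (by simpa using hle)]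
        omega
      · simp [PySem.Chars.count.go, List.isPrefixOf, hc, ih f acc (by simpa using hle), List.count_cons]
        exact fun h' => hc h'.symm

lemma chars_count_singleton (c : Char) (l : List Char) :
    PySem.Chars.count l [c] = l.count c := by
  simp [PySem.Chars.count, go_singleton c l l.length 0 le_rfl]

-- A's fold over the whole string equals (final balance, B's per-position count in take/List.count form).
lemma enum_append (xs : List Char) (x : Char) : ∀ (s : Int),
    PySem.List.enumerate (xs ++ [x]) s = PySem.List.enumerate xs s ++ [(s + xs.length, x)] := by
  induction xs with
  | nil => intro s; simp [PySem.List.enumerate_cons, PySem.List.enumerate_nil]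
  | cons y ys ih =>
    intro s
    simp [PySem.List.enumerate_cons, ih (s+1)]
    ring

lemma pv_main (cs : List Char) :
    (cs.foldl
      (fun (s : Int × Int) c =>
        let bd := if c = '(' then s.1 + 1 else s.1
        if c = ')' then
          let bd' := bd - 1
          (bd', if bd' = 0 then s.2 + 1 else s.2)
        else (bd, s.2))
      (0, 0))
    = ((cs.count '(' : Int) - (cs.count ')' : Int),
       ((PySem.List.enumerate cs 0).map (fun p =>
          if p.2 = ')' ∧
             (List.take (p.1 + 1).toNat cs).count '(' =
             (List.take (p.1 + 1).toNat cs).count ')'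
          then (1 : Int) else 0)).sum) := by
  induction cs using List.reverseRecOn with
  | nil => simp [PySem.List.enumerate_nil]
  | append_singleton cs c ih =>
    rw [List.foldl_append, ih]
    have hmap : ((PySem.List.enumerate cs 0).map (fun p =>
          if p.2 = ')' ∧
             (List.take (p.1 + 1).toNat (cs ++ [c])).count '(' =
             (List.take (p.1 + 1).toNat (cs ++ [c])).count ')'
          then (1 : Int) else 0))
        = ((PySem.List.enumerate cs 0).map (fun p =>
          if p.2 = ')' ∧
             (List.take (p.1 + 1).toNat cs).count '(' =
             (List.take (p.1 + 1).toNat cs).count ')'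
          then (1 : Int) else 0)) := by
      apply List.map_congr_left
      intro p hp
      obtain ⟨k, hk, rfl⟩ := (PySem.List.mem_enumerate_iff _ _ _).1 hp
      have h1 : ((0 : Int) + ↑k + 1).toNat = k + 1 := by omega
      rw [h1, List.take_append_of_le_length (by omega)]
    rw [enum_append, List.map_append, List.sum_append, hmap]
    have hlast : ((0 : Int) + ↑cs.length + 1).toNat = cs.length + 1 := by omega
    simp only [List.map_cons, List.map_nil, List.sum_cons, List.sum_nil, hlast]
    have htake : List.take (cs.length + 1) (cs ++ [c]) = cs ++ [c] := by
      apply List.take_of_length_le; simp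
    rw [htake]
    by_cases h2 : c = ')'
    · subst h2
      by_cases h3 : (cs.count '(' : Int) - (cs.count ')' : Int) - 1 = 0
      · have hc : (cs ++ [')']).count '(' = (cs ++ [')']).count ')' := by
          simp [List.count_append]; omega
        simp [hc, h3]
      · have hc : ¬ ((cs ++ [')']).count '(' = (cs ++ [')']).count ')') := by
          simp [List.count_append]; omega
        simp [h3, List.count_append]
        constructor
        · ring
        · omega
    · by_cases h1 : c = '('
      · subst h1
        simp [List.count_append]
        ring
      · simp [h1, h2, List.count_append]

-- ===== VERDICT (by name: the statement is the Claim_ definition above) =====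
theorem count_atoms_spec : Claim_equal_count_atoms := by
  intro atoms _
  unfold Spec_count_atoms count_atoms count_atoms_alt
  rw [pv_main]
  refine congrArg List.sum (List.map_congr_left ?_)
  intro p hp
  obtain ⟨k, hk, rfl⟩ := (PySem.List.mem_enumerate_iff _ _ _).1 hp
  have h0 : (0 : Int) + ↑k + 1 = ((k + 1 : Nat) : Int) := by push_cast; ring
  rw [h0, PySem.List.slice_to_natCast, chars_count_singleton, chars_count_singleton]
  simp
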